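-- pv_equiv track=rewrite | github.com/NoviceCoderInfinity/CS_663_Digital_Image_Processing | Project/code/JPEG_tkinter_tk.py | decode_dc_coefficients
-- ===== SOURCE A (Python) =====
-- def decode_dc_coefficients(encoded_dc, dc_huffman_table):
--     reverse_dc_huffman_table = {v: k for k, v in dc_huffman_table.items()}
--     dc_differences = [encoded_dc[0]]
--     for code in encoded_dc[1:]:
--         diff = int(reverse_dc_huffman_table[code])
--         dc_differences.append(diff)
--
--     dc_coefficients = [dc_differences[0]]
--     for i in range(1, len(dc_differences)):
--         dc_coefficients.append(dc_coefficients[i-1] + dc_differences[i])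
--
--     return dc_coefficients
-- ===== SOURCE B (Python) =====
-- def decode_dc_coefficients(encoded_dc, dc_huffman_table):
--     reverse_dc_huffman_table = {v: k for k, v in dc_huffman_table.items()}
--     running = encoded_dc[0]
--     dc_coefficients = [running]
--     for code in encoded_dc[1:]:
--         running += int(reverse_dc_huffman_table[code])
--         dc_coefficients.append(running)
--     return dc_coefficients
-- ===== Notes on version B (the rewrite author's own statement) =====
-- stated objective: simpler
-- what changed: Single pass with a running accumulator: the decoded difference is added to the running DC value inline, so the intermediate dc_differences list and the second index-based prefix-sum loop disappear.
import Mathlib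
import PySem

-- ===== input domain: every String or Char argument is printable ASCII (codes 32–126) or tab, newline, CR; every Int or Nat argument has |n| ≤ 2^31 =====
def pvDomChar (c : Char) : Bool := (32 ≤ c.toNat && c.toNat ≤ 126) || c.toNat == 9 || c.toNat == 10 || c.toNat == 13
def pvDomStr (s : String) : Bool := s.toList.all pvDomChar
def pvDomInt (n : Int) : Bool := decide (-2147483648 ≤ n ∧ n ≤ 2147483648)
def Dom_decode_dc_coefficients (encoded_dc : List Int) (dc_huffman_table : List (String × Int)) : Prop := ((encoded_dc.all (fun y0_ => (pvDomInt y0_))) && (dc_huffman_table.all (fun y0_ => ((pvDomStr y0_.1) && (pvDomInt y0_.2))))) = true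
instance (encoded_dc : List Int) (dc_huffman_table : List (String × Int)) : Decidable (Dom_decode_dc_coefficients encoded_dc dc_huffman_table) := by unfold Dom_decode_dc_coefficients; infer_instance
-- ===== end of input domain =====

-- B fuses A's two passes into one: the decoded difference is added to a running DC value
-- inline, so the intermediate dc_differences list and the index-based prefix-sum loop disappear.

-- ===== PORT A =====
-- reverse_dc_huffman_table = {v: k for k, v in dc_huffman_table.items()}  (shared by both Pythons verbatim)
def pvRevTable (dc_huffman_table : List (String × Int)) : PySem.Dict Int String :=
  dc_huffman_table.foldl (fun d p => d.insert p.2 p.1) PySem.Dict.empty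

-- diff = int(reverse_dc_huffman_table[code]); KeyError/ValueError are excluded by Pre_, 0 is the off-domain default
def pvDecodeDiff (rev : PySem.Dict Int String) (code : Int) : Int :=
  ((rev.get? code).bind PySem.Int.ofStr?).getD 0

def decode_dc_coefficients (encoded_dc : List Int) (dc_huffman_table : List (String × Int)) : List Int :=
  let rev := pvRevTable dc_huffman_table
  match PySem.List.pyGet? encoded_dc 0 with
  | none => []   -- encoded_dc[0] raises IndexError; excluded by Pre_
  | some e0 =>
    let dc_differences :=
      (PySem.List.slice encoded_dc (some 1) none).foldl
        (fun acc code => acc ++ [pvDecodeDiff rev code]) [e0]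
    (PySem.List.pyRange 1 (dc_differences.length : Int) 1).foldl
      (fun acc i => acc ++ [PySem.List.pyGetD acc (i - 1) 0 + PySem.List.pyGetD dc_differences i 0])
      [PySem.List.pyGetD dc_differences 0 0]

-- ===== PORT B =====
def decode_dc_coefficients_alt (encoded_dc : List Int) (dc_huffman_table : List (String × Int)) : List Int :=
  let rev := pvRevTable dc_huffman_table
  match PySem.List.pyGet? encoded_dc 0 with
  | none => []   -- encoded_dc[0] raises IndexError; excluded by Pre_
  | some e0 =>
    ((PySem.List.slice encoded_dc (some 1) none).foldl
      (fun (st : List Int × Int) code =>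
        let running := st.2 + pvDecodeDiff rev code
        (st.1 ++ [running], running))
      ([e0], e0)).1

-- ===== PRECONDITION & SPEC =====
-- Pre_ excludes exactly the inputs where Python A raises: an empty encoded_dc (IndexError),
-- and tail codes whose last matching table value is absent (KeyError) or whose key does not parse as int (ValueError).
def Pre_decode_dc_coefficients (encoded_dc : List Int) (dc_huffman_table : List (String × Int)) : Prop :=
  encoded_dc ≠ [] ∧
  ∀ c ∈ encoded_dc.drop 1,
    ((((dc_huffman_table.reverse.find? (fun q => q.2 == c)).map (·.1)).bind PySem.Int.ofStr?).isSome = true)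

instance (encoded_dc : List Int) (dc_huffman_table : List (String × Int)) : Decidable (Pre_decode_dc_coefficients encoded_dc dc_huffman_table) := by unfold Pre_decode_dc_coefficients; infer_instance

def pvWitness_decode_dc_coefficients : List Int × (List (String × Int)) := ([5, 2, 7, 2], [("3", 2), ("-1", 7)])

def Spec_decode_dc_coefficients (encoded_dc : List Int) (dc_huffman_table : List (String × Int)) (out : List Int) : Prop := out = decode_dc_coefficients_alt encoded_dc dc_huffman_table
instance (encoded_dc : List Int) (dc_huffman_table : List (String × Int)) (out : List Int) : Decidable (Spec_decode_dc_coefficients encoded_dc dc_huffman_table out) := by unfold Spec_decode_dc_coefficients; infer_instance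

-- ===== CLAIM (what is proved, stated in full; the proofs are below) =====
def Claim_equal_decode_dc_coefficients : Prop := ∀ (encoded_dc : List Int) (dc_huffman_table : List (String × Int)), Dom_decode_dc_coefficients encoded_dc dc_huffman_table → Pre_decode_dc_coefficients encoded_dc dc_huffman_table → Spec_decode_dc_coefficients encoded_dc dc_huffman_table (decode_dc_coefficients encoded_dc dc_huffman_table)

-- ===== LEMMAS AND PROOFS =====

-- prefix sums seeded with a: the common value of A's second loop and B's fused loop
def pvSums : Int → List Int → List Int
  | a, [] => [a]
  | a, x :: xs => a :: pvSums (a + x) xs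

theorem pvSums_getD_last (a : Int) (l : List Int) : (pvSums a l).getD l.length 0 = a + l.sum := by
  induction l generalizing a with
  | nil => simp [pvSums]
  | cons x xs ih =>
    simp only [pvSums, List.length_cons, List.getD_cons_succ, List.sum_cons, ih]
    ring

theorem pvSums_append (a x : Int) (l : List Int) :
    pvSums a (l ++ [x]) = pvSums a l ++ [a + l.sum + x] := by
  induction l generalizing a with
  | nil => simp [pvSums]
  | cons y ys ih => simp [pvSums, ih]; ring_nf

-- B's fused loop computes the prefix sums of the decoded differences
theorem pvFoldB (g : Int → Int) (l : List Int) : ∀ (o : List Int) (a : Int),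
    (l.foldl (fun (st : List Int × Int) c =>
        let running := st.2 + g c
        (st.1 ++ [running], running)) (o ++ [a], a)).1 = o ++ pvSums a (l.map g) := by
  induction l with
  | nil => intro o a; simp [pvSums]
  | cons x xs ih =>
    intro o a
    have h := ih (o ++ [a]) (a + g x)
    simp only [List.foldl_cons]
    simpa [List.append_assoc, pvSums] using h

theorem pvPyGetD_append_left (xs ys : List Int) (i d : Int) (h0 : 0 ≤ i)
    (h1 : i < (xs.length : Int)) :
    PySem.List.pyGetD (xs ++ ys) i d = PySem.List.pyGetD xs i d := by
  obtain ⟨n, rfl⟩ : ∃ n : ℕ, i = (n : Int) := ⟨i.toNat, (Int.toNat_of_nonneg h0).symm⟩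
  have hn : n < xs.length := by exact_mod_cast h1
  rw [PySem.List.pyGetD_natCast, PySem.List.pyGetD_natCast,
    List.getD_eq_getElem?_getD, List.getD_eq_getElem?_getD, List.getElem?_append_left hn]

-- A's index-based second loop computes the same prefix sums
theorem pvFoldA (a : Int) (l : List Int) :
    (PySem.List.pyRange 1 (((a :: l).length : Int)) 1).foldl
      (fun acc i => acc ++ [PySem.List.pyGetD acc (i - 1) 0 + PySem.List.pyGetD (a :: l) i 0])
      [a] = pvSums a l := by
  induction l using List.reverseRecOn with
  | nil =>
    rw [PySem.List.pyRange_one_eq_nil (by simp)]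
    simp [pvSums]
  | append_singleton l x ih =>
    have hlen : (((a :: (l ++ [x])).length : Int)) = ((((a :: l).length : Int))) + 1 := by
      push_cast [List.length_cons, List.length_append]; simp
    rw [hlen, PySem.List.pyRange_one_succ_right
      (by simp only [List.length_cons]; push_cast; omega), List.foldl_append]
    have hcongr :
        (PySem.List.pyRange 1 (((a :: l).length : Int)) 1).foldl
          (fun acc i => acc ++ [PySem.List.pyGetD acc (i - 1) 0 + PySem.List.pyGetD (a :: (l ++ [x])) i 0])
          [a]
        = (PySem.List.pyRange 1 (((a :: l).length : Int)) 1).foldl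
          (fun acc i => acc ++ [PySem.List.pyGetD acc (i - 1) 0 + PySem.List.pyGetD (a :: l) i 0])
          [a] := by
      apply PySem.List.foldl_congr_mem
      intro acc i hi
      rw [PySem.List.mem_pyRange_one] at hi
      have h0 : (0 : Int) ≤ i := by omega
      have h1 : i < ((a :: l).length : Int) := hi.2
      rw [← List.cons_append, pvPyGetD_append_left _ _ _ _ h0 h1]
    rw [hcongr, ih]
    have hidx : (((a :: l).length : Int)) - 1 = ((l.length : Int)) := by
      push_cast [List.length_cons]; ring
    have hlast : PySem.List.pyGetD (pvSums a l) (((a :: l).length : Int) - 1) 0 = a + l.sum := by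
      rw [hidx, PySem.List.pyGetD_natCast, pvSums_getD_last]
    have hx : PySem.List.pyGetD (a :: (l ++ [x])) (((a :: l).length : Int)) 0 = x := by
      rw [← List.cons_append, PySem.List.pyGetD_natCast]
      simp [List.getD_eq_getElem?_getD]
    simp only [List.foldl_cons, List.foldl_nil]
    rw [hlast, hx, pvSums_append]

theorem decode_dc_coefficients_eq_alt (encoded_dc : List Int) (dc_huffman_table : List (String × Int)) :
    decode_dc_coefficients encoded_dc dc_huffman_table = decode_dc_coefficients_alt encoded_dc dc_huffman_table := by
  cases encoded_dc with
  | nil => rfl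
  | cons e0 rest =>
    unfold decode_dc_coefficients decode_dc_coefficients_alt
    have hget : PySem.List.pyGet? (e0 :: rest) (0 : Int) = some e0 := by
      simp [PySem.List.pyGet?, PySem.List.pyIdx?]
    rw [hget]
    have hslice : PySem.List.slice (e0 :: rest) (some 1) none = rest := by
      rw [PySem.List.slice_from_one]; rfl
    simp only [hslice]
    have hdiff :
        rest.foldl (fun acc code => acc ++ [pvDecodeDiff (pvRevTable dc_huffman_table) code]) [e0]
          = e0 :: rest.map (pvDecodeDiff (pvRevTable dc_huffman_table)) := by
      rw [PySem.List.foldl_append_singleton_eq_map]; rfl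
    simp only [hdiff]
    have hseed : PySem.List.pyGetD (e0 :: rest.map (pvDecodeDiff (pvRevTable dc_huffman_table))) 0 0 = e0 :=
      PySem.List.pyGetD_zero_cons _ _ _
    rw [hseed, pvFoldA]
    have hB := pvFoldB (pvDecodeDiff (pvRevTable dc_huffman_table)) rest [] e0
    simp only [List.nil_append] at hB
    rw [hB]

-- ===== VERDICT (by name: the statement is the Claim_ definition above) =====
theorem decode_dc_coefficients_spec : Claim_equal_decode_dc_coefficients := by
  intro e t _dom _pre
  unfold Spec_decode_dc_coefficients
  exact decode_dc_coefficients_eq_alt e t
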